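-- pv_equiv track=rewrite | github.com/ataslim0343/Data-Structures-and-Algorithms | GeeksForGeeks/Array/Intersection of two arrays.py | countIntersection
-- ===== SOURCE A (Python) =====
-- def countIntersection(a, b, n, m):
--     ans=[]
--     d={}
--     for i in b:
--         if i in d:
--             d[i]+=1
--         else:
--             d[i]=1
--     for j in a:
--         if j in d and j not in ans:
--             ans.append(j)
--     return len(ans)
-- ===== SOURCE B (Python) =====
-- def countIntersection(a, b, n, m):
--     xs = sorted(set(a))
--     ys = sorted(set(b))
--     i = j = cnt = 0
--     while i < len(xs) and j < len(ys):
--         if xs[i] < ys[j]: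
--             i += 1
--         elif ys[j] < xs[i]:
--             j += 1
--         else:
--             cnt += 1
--             i += 1
--             j += 1
--     return cnt
-- ===== Notes on version B (the rewrite author's own statement) =====
-- stated objective: faster
-- what changed: Replaces A's hash-based accumulation (frequency dict + append-with-'not in ans' dedup scan) by a comparison-based sort-and-merge: sort the deduplicated copies of a and b and count common values with a two-pointer merge walk.
import Mathlib
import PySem

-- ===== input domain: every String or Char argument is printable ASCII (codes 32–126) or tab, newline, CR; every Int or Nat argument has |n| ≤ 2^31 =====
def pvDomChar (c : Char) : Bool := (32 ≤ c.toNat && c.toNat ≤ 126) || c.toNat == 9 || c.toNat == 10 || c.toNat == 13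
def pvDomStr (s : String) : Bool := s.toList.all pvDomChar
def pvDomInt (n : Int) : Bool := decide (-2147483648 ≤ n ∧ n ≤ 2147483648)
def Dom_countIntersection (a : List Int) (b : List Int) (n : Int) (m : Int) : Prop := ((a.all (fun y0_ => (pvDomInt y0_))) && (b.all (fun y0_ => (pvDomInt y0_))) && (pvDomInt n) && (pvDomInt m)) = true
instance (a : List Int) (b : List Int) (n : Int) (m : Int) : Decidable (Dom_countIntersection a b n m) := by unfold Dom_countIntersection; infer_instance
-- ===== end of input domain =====

-- B replaces A's frequency-dict build and append-with-dedup loop by sort-the-distinct-values + a two-pointer merge count (alternative algorithm, similar cost).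


-- ===== PORT A =====
def countIntersection (a : List Int) (b : List Int) (_n : Int) (_m : Int) : Int :=
  -- d = {}; for i in b: if i in d: d[i]+=1 else: d[i]=1
  let d : PySem.Dict Int Int :=
    b.foldl (fun d i => if d.contains i then d.modify i 0 (· + 1) else d.insert i 1) PySem.Dict.empty
  -- ans = []; for j in a: if j in d and j not in ans: ans.append(j)
  let ans : List Int :=
    a.foldl (fun ans j => if d.contains j && !(ans.contains j) then ans ++ [j] else ans) []
  (ans.length : Int)

-- ===== PORT B =====
-- the two-pointer while loop of Source B: advance in xs, in ys, or in both (counting a match)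
def pvMergeCount : List Int → List Int → Int
  | [], _ => 0
  | _ :: _, [] => 0
  | x :: xs, y :: ys =>
      if x < y then pvMergeCount xs (y :: ys)
      else if y < x then pvMergeCount (x :: xs) ys
      else 1 + pvMergeCount xs ys

def countIntersection_alt (a : List Int) (b : List Int) (_n : Int) (_m : Int) : Int :=
  let xs := PySem.List.sorted (PySem.Set.ofList a) (fun x => x) false   -- sorted(set(a))
  let ys := PySem.List.sorted (PySem.Set.ofList b) (fun x => x) false   -- sorted(set(b))
  pvMergeCount xs ys

-- ===== PRECONDITION & SPEC =====
def Spec_countIntersection (a : List Int) (b : List Int) (n : Int) (m : Int) (out : Int) : Prop := out = countIntersection_alt a b n m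
instance (a : List Int) (b : List Int) (n : Int) (m : Int) (out : Int) : Decidable (Spec_countIntersection a b n m out) := by unfold Spec_countIntersection; infer_instance

-- ===== CLAIM (what is proved, stated in full; the proofs are below) =====
def Claim_equal_countIntersection : Prop := ∀ (a : List Int) (b : List Int) (n : Int) (m : Int), Dom_countIntersection a b n m → Spec_countIntersection a b n m (countIntersection a b n m)

-- ===== LEMMAS AND PROOFS =====

-- A's counter dict contains exactly the elements of b
theorem contains_counterFold (b : List Int) (d : PySem.Dict Int Int) (j : Int) :
    (b.foldl (fun d i => if d.contains i then d.modify i 0 (· + 1) else d.insert i 1) d).contains j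
      = (d.contains j || b.contains j) := by
  induction b generalizing d with
  | nil => simp
  | cons i rest ih =>
    simp only [List.foldl_cons, ih]
    by_cases h : d.contains i = true
    · by_cases hj : j = i
      · simp [h, hj, PySem.Dict.contains_modify]
      · simp [h, hj, PySem.Dict.contains_modify, beq_eq_false_iff_ne.mpr hj]
    · by_cases hj : j = i
      · simp [h, hj]
      · simp [h, hj, PySem.Dict.contains_insert, beq_eq_false_iff_ne.mpr hj]

-- A's ans-building loop is set(filter)
theorem ansFold_eq (a : List Int) (b : List Int) :
    a.foldl (fun ans j => if b.contains j && !(ans.contains j) then ans ++ [j] else ans) []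
      = PySem.Set.ofList (a.filter (fun j => b.contains j)) := by
  have hstep : a.foldl (fun ans j => if b.contains j && !(ans.contains j) then ans ++ [j] else ans) []
      = a.foldl (fun ans j => if b.contains j then PySem.Set.add ans j else ans) [] := by
    apply PySem.List.foldl_congr_mem
    intro acc x _
    by_cases hb : x ∈ b <;> by_cases ha : x ∈ acc <;>
      simp [PySem.Set.add, hb, ha]
  rw [hstep, PySem.List.foldl_if_eq_foldl_filter]
  rw [PySem.Set.ofList_eq_foldl]

theorem countIntersection_eq_len (a : List Int) (b : List Int) (n m : Int) :
    countIntersection a b n m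
      = ((PySem.Set.ofList (a.filter (fun j => b.contains j))).length : Int) := by
  unfold countIntersection
  simp only [contains_counterFold, PySem.Dict.contains_empty, Bool.false_or]
  rw [ansFold_eq]

-- on strictly increasing lists, the two-pointer merge counts the elements of xs present in ys
theorem mergeCount_eq_filter (xs ys : List Int)
    (hx : xs.Pairwise (· < ·)) (hy : ys.Pairwise (· < ·)) :
    pvMergeCount xs ys = ((xs.filter (fun x => ys.contains x)).length : Int) := by
  induction xs, ys using pvMergeCount.induct with
  | case1 ys => simp [pvMergeCount]
  | case2 x xs => simp [pvMergeCount]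
  | case3 x xs y ys hlt ih =>
    have hxy : ¬ (x = y ∨ x ∈ ys) := by
      rintro (h | h)
      · omega
      · have := (List.pairwise_cons.mp hy).1 x h; omega
    rw [pvMergeCount, if_pos hlt, ih hx.tail hy]
    simp [hxy]
  | case4 x xs y ys hlt hgt ih =>
    rw [pvMergeCount, if_neg hlt, if_pos hgt, ih hx hy.tail]
    have hfix : (x :: xs).filter (fun z => ys.contains z)
        = (x :: xs).filter (fun z => (y :: ys).contains z) := by
      apply List.filter_congr
      intro z hz
      have hxz : x ≤ z := by
        rcases List.mem_cons.mp hz with h | h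
        · omega
        · have := (List.pairwise_cons.mp hx).1 z h; omega
      have hzy : z ≠ y := by omega
      simp [hzy]
    rw [hfix]
  | case5 x xs y ys hlt hgt ih =>
    have hxy : x = y := by omega
    rw [pvMergeCount, if_neg hlt, if_neg hgt, ih hx.tail hy.tail]
    have hfix : xs.filter (fun z => (decide (z = y) || decide (z ∈ ys)))
        = xs.filter (fun z => decide (z ∈ ys)) := by
      apply List.filter_congr
      intro z hz
      have hxz : x < z := (List.pairwise_cons.mp hx).1 z hz
      have hzy : z ≠ y := by omega
      simp [hzy]
    simp [hxy, hfix]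
    ring

-- the two deduplications have the same distinct common elements
theorem len_filter_eq (a : List Int) (b : List Int) :
    (((PySem.Set.ofList a).filter (fun x => b.contains x)).length)
      = (PySem.Set.ofList (a.filter (fun j => b.contains j))).length := by
  apply List.Perm.length_eq
  apply (List.perm_ext_iff_of_nodup ((PySem.Set.nodup_ofList a).filter _) (PySem.Set.nodup_ofList _)).mpr
  intro x
  simp [List.mem_filter, PySem.Set.mem_ofList]

-- ===== VERDICT (by name: the statement is the Claim_ definition above) =====
theorem countIntersection_spec : Claim_equal_countIntersection := by
  intro a b n m _
  unfold Spec_countIntersection countIntersection_alt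
  rw [countIntersection_eq_len]
  rw [mergeCount_eq_filter _ _ (PySem.List.sorted_ofList_pairwise_lt a)
        (PySem.List.sorted_ofList_pairwise_lt b)]
  have hcong : (PySem.List.sorted (PySem.Set.ofList a) (fun x => x) false).filter
        (fun x => (PySem.List.sorted (PySem.Set.ofList b) (fun x => x) false).contains x)
      = (PySem.List.sorted (PySem.Set.ofList a) (fun x => x) false).filter
        (fun x => b.contains x) := by
    apply List.filter_congr
    intro z _
    by_cases hb : z ∈ b
    · simp [PySem.List.mem_sorted, PySem.Set.mem_ofList, hb]
    · simp [PySem.List.mem_sorted, PySem.Set.mem_ofList, hb]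
  rw [hcong]
  have hperm : ((PySem.List.sorted (PySem.Set.ofList a) (fun x => x) false).filter
        (fun x => b.contains x)).Perm ((PySem.Set.ofList a).filter (fun x => b.contains x)) :=
    (PySem.List.sorted_perm _ _ _).filter _
  rw [hperm.length_eq, len_filter_eq]
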